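-- pv_equiv track=rewrite | github.com/Testacc991/My_Python_exercises | Snippets/extract_text.py | opracuvaty_rechennya_vyklychennya
-- ===== SOURCE A (Python) =====
-- def opracuvaty_rechennya_vyklychennya(text):
--     iterate_list = text.split(".") #Розбиваємо текст на речення
--     conc_list = text.split(".")
--     finallist = []
--     for i in range(len(iterate_list)):
--         if iterate_list[i][-1].isupper():
--                 conc_list[i] = iterate_list[i]+"."+iterate_list[i+1]
--                 try:
--                     conc_list[i+1] = ""
--                 except:
--                     break
--     for i in conc_list:
--         if i != "":
--             finallist.append(i)
--
--     return finallist
-- ===== SOURCE B (Python) =====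
-- def opracuvaty_rechennya_vyklychennya(text):
--     frags = text.split(".")
--     out = []
--     for i in range(len(frags)):
--         f = frags[i]
--         if f[-1].isupper():
--             out.append(f + "." + frags[i + 1])
--         elif i == 0 or not frags[i - 1][-1].isupper():
--             out.append(f)
--     return out
-- ===== Notes on version B (the rewrite author's own statement) =====
-- stated objective: simpler
-- what changed: A mutates a second parallel copy of the split list (blanking consumed fragments) and then filters out the blanks in a second pass; B builds the result in one forward pass over the split, appending the merged sentence when a fragment ends in uppercase and otherwise appending the fragment only when the previous fragment did not end in uppercase.
-- outside the precondition, e.g. on opracuvaty_rechennya_vyklychennya('.'): A raises IndexError, B raises IndexError; on opracuvaty_rechennya_vyklychennya('a..b'): A raises IndexError, B raises IndexError; on opracuvaty_rechennya_vyklychennya('aB'): A raises IndexError, B raises IndexError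
import Mathlib
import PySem

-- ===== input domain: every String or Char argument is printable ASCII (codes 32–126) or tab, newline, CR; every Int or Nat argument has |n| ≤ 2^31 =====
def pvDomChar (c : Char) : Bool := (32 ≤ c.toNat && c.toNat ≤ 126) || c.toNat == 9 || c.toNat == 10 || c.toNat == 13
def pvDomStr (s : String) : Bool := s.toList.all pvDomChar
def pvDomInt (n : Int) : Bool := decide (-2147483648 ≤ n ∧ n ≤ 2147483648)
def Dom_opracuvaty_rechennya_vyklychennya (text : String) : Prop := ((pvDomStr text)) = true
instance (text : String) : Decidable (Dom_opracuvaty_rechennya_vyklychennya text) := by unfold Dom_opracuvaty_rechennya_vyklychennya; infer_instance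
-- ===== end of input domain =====

-- B replaces A's parallel-list blanking plus final filter by a single forward pass with a
-- look-behind test (objective: simpler). Equality of RETURN values is proved on Pre_ (the
-- inputs where the Python A returns instead of raising IndexError).

-- ===== PORT A =====

-- port of the Python expression s[-1].isupper() (on "" Python raises; inside Pre_ never hit)
def pvLastUpper (s : String) : Bool :=
  match PySem.Str.pyGet? s (-1) with
  | some c => PySem.Chars.isupper c
  | none => false

def opracuvaty_rechennya_vyklychennya (text : String) : List String :=
  -- text.split("."): separator "." ≠ "" so split? is always `some`
  let iterateList := (PySem.Str.split? text ".").getD []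
  let concList := (PySem.Str.split? text ".").getD []
  let concList := (List.range iterateList.length).foldl (fun conc i =>
    if pvLastUpper (iterateList.getD i "") then
      -- conc_list[i] = iterate_list[i] + "." + iterate_list[i+1]; conc_list[i+1] = ""
      (conc.set i ((iterateList.getD i "") ++ "." ++ (iterateList.getD (i + 1) ""))).set (i + 1) ""
    else conc) concList
  concList.foldl (fun acc s => if s ≠ "" then acc ++ [s] else acc) []

-- ===== PORT B =====
def opracuvaty_rechennya_vyklychennya_alt (text : String) : List String :=
  let frags := (PySem.Str.split? text ".").getD []
  (List.range frags.length).foldl (fun out i =>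
    let f := frags.getD i ""
    if pvLastUpper f then out ++ [f ++ "." ++ frags.getD (i + 1) ""]
    else if i == 0 || !pvLastUpper (frags.getD (i - 1) "") then out ++ [f]
    else out) []

-- ===== PRECONDITION & SPEC =====
-- Pre_ excludes exactly the inputs where the Python A raises IndexError: a fragment of
-- text.split(".") is empty (""[-1] raises), or the last fragment ends in an uppercase
-- letter (iterate_list[i+1] is then out of range).
def Pre_opracuvaty_rechennya_vyklychennya (text : String) : Prop :=
  let frags := (PySem.Str.split? text ".").getD []
  (∀ f ∈ frags, f ≠ "") ∧ pvLastUpper (frags.getD (frags.length - 1) "") = false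
instance (text : String) : Decidable (Pre_opracuvaty_rechennya_vyklychennya text) := by
  unfold Pre_opracuvaty_rechennya_vyklychennya; infer_instance

def pvWitness_opracuvaty_rechennya_vyklychennya : String := "aB.cD.e"

def Spec_opracuvaty_rechennya_vyklychennya (text : String) (out : List String) : Prop := out = opracuvaty_rechennya_vyklychennya_alt text
instance (text : String) (out : List String) : Decidable (Spec_opracuvaty_rechennya_vyklychennya text out) := by unfold Spec_opracuvaty_rechennya_vyklychennya; infer_instance

-- ===== CLAIM (what is proved, stated in full; the proofs are below) =====
def Claim_equal_opracuvaty_rechennya_vyklychennya : Prop := ∀ (text : String), Dom_opracuvaty_rechennya_vyklychennya text → Pre_opracuvaty_rechennya_vyklychennya text → Spec_opracuvaty_rechennya_vyklychennya text (opracuvaty_rechennya_vyklychennya text)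

-- ===== LEMMAS AND PROOFS =====

-- final value of conc_list[j] after A's first loop
def pvG (frags : List String) (j : Nat) : String :=
  if pvLastUpper (frags.getD j "") then frags.getD j "" ++ "." ++ frags.getD (j + 1) ""
  else if 0 < j ∧ pvLastUpper (frags.getD (j - 1) "") = true then "" else frags.getD j ""

-- what B appends at index j
def pvH (frags : List String) (j : Nat) : List String :=
  if pvLastUpper (frags.getD j "") then [frags.getD j "" ++ "." ++ frags.getD (j + 1) ""]
  else if j == 0 || !pvLastUpper (frags.getD (j - 1) "") then [frags.getD j ""]
  else []

-- value of conc_list[j] after the first k iterations of A's loop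
def pvC (frags : List String) (k j : Nat) : String :=
  if j < k then pvG frags j
  else if j = k ∧ 0 < k ∧ pvLastUpper (frags.getD (k - 1) "") = true then ""
  else frags.getD j ""

lemma pvC_succ_true (frags : List String) (k j : Nat)
    (hU : pvLastUpper (frags.getD k "") = true) :
    (if k + 1 = j then "" else if k = j then frags.getD k "" ++ "." ++ frags.getD (k + 1) ""
     else pvC frags k j) = pvC frags (k + 1) j := by
  rcases Nat.lt_trichotomy j k with h | h | h
  · rw [if_neg (by omega), if_neg (by omega)]
    simp only [pvC]
    rw [if_pos h, if_pos (by omega)]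
  · subst h
    rw [if_neg (by omega), if_pos rfl]
    simp only [pvC, pvG]
    rw [if_pos (Nat.lt_succ_self j), if_pos hU]
  · rcases Nat.eq_or_lt_of_le h with h2 | h2
    · rw [if_pos h2]
      simp only [pvC]
      rw [if_neg (by omega),
        if_pos ⟨h2.symm, Nat.succ_pos k, by rw [Nat.add_sub_cancel]; exact hU⟩]
    · rw [if_neg (by omega), if_neg (by omega)]
      simp only [pvC]
      rw [if_neg (by omega : ¬ j < k), if_neg (fun hand => absurd hand.1 (by omega)),
        if_neg (by omega : ¬ j < k + 1), if_neg (fun hand => absurd hand.1 (by omega))]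

lemma pvC_succ_false (frags : List String) (k j : Nat)
    (hU : pvLastUpper (frags.getD k "") = false) :
    pvC frags k j = pvC frags (k + 1) j := by
  rcases Nat.lt_trichotomy j k with h | h | h
  · simp only [pvC]
    rw [if_pos h, if_pos (by omega)]
  · subst h
    simp only [pvC, pvG]
    rw [if_neg (lt_irrefl j), if_pos (Nat.lt_succ_self j),
      if_neg (fun hh => Bool.false_ne_true (hU ▸ hh))]
    by_cases hc : 0 < j ∧ pvLastUpper (frags.getD (j - 1) "") = true
    · rw [if_pos ⟨trivial, hc.1, hc.2⟩, if_pos hc]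
    · rw [if_neg (fun hand => hc ⟨hand.2.1, hand.2.2⟩), if_neg hc]
  · simp only [pvC]
    rw [if_neg (by omega : ¬ j < k), if_neg (fun hand => absurd hand.1 (by omega)),
      if_neg (by omega : ¬ j < k + 1)]
    rw [if_neg ?_]
    rintro ⟨h1, -, h3⟩
    rw [Nat.add_sub_cancel] at h3
    rw [hU] at h3
    exact Bool.false_ne_true h3

lemma pvA_fold (frags : List String) (k : Nat) (hk : k ≤ frags.length) :
    (List.range k).foldl (fun conc i =>
      if pvLastUpper (frags.getD i "") then
        (conc.set i ((frags.getD i "") ++ "." ++ (frags.getD (i + 1) ""))).set (i + 1) ""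
      else conc) frags
    = (List.range frags.length).map (pvC frags k) := by
  induction k with
  | zero =>
    simp only [List.range_zero, List.foldl_nil]
    apply List.ext_getElem (by simp)
    intro i h1 h2
    simp [pvC, List.getD_eq_getElem?_getD, List.getElem?_eq_getElem h1]
  | succ k ih =>
    rw [List.range_succ, List.foldl_append, ih (by omega)]
    simp only [List.foldl_cons, List.foldl_nil]
    by_cases hU : pvLastUpper (frags.getD k "") = true
    · rw [if_pos hU]
      apply List.ext_getElem (by simp)
      intro j hj1 hj2
      simp only [List.getElem_set, List.getElem_map, List.getElem_range]
      exact pvC_succ_true frags k j hU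
    · rw [if_neg hU]
      apply List.map_congr_left
      intro j hj
      exact pvC_succ_false frags k j (by simpa using hU)

lemma pvA_eq_filter (text : String) :
    opracuvaty_rechennya_vyklychennya text
    = ((List.range ((PySem.Str.split? text ".").getD []).length).map
        (pvG ((PySem.Str.split? text ".").getD []))).filter (fun s => decide (s ≠ "")) := by
  have h0 : opracuvaty_rechennya_vyklychennya text
      = List.foldl (fun acc s => if s ≠ "" then acc ++ [s] else acc) []
          ((List.range ((PySem.Str.split? text ".").getD []).length).foldl (fun conc i =>
            if pvLastUpper (((PySem.Str.split? text ".").getD []).getD i "") then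
              (conc.set i ((((PySem.Str.split? text ".").getD []).getD i "") ++ "." ++
                (((PySem.Str.split? text ".").getD []).getD (i + 1) ""))).set (i + 1) ""
            else conc) ((PySem.Str.split? text ".").getD [])) := rfl
  rw [h0, pvA_fold ((PySem.Str.split? text ".").getD []) _ le_rfl,
    PySem.List.foldl_append_ite_eq_filter, List.nil_append]
  congr 1
  apply List.map_congr_left
  intro j hj
  simp only [pvC]
  rw [if_pos (List.mem_range.mp hj)]

lemma pvB_eq_flatMap (text : String) :
    opracuvaty_rechennya_vyklychennya_alt text
    = (List.range ((PySem.Str.split? text ".").getD []).length).flatMap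
        (pvH ((PySem.Str.split? text ".").getD [])) := by
  have h0 : opracuvaty_rechennya_vyklychennya_alt text
      = (List.range ((PySem.Str.split? text ".").getD []).length).foldl (fun out i =>
          if pvLastUpper (((PySem.Str.split? text ".").getD []).getD i "") then
            out ++ [(((PySem.Str.split? text ".").getD []).getD i "") ++ "." ++
              (((PySem.Str.split? text ".").getD []).getD (i + 1) "")]
          else if i == 0 || !pvLastUpper (((PySem.Str.split? text ".").getD []).getD (i - 1) "") then
            out ++ [((PySem.Str.split? text ".").getD []).getD i ""]
          else out) [] := rfl
  have hstep : (fun (out : List String) (i : Nat) =>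
      if pvLastUpper (((PySem.Str.split? text ".").getD []).getD i "") then
        out ++ [(((PySem.Str.split? text ".").getD []).getD i "") ++ "." ++
          (((PySem.Str.split? text ".").getD []).getD (i + 1) "")]
      else if i == 0 || !pvLastUpper (((PySem.Str.split? text ".").getD []).getD (i - 1) "") then
        out ++ [((PySem.Str.split? text ".").getD []).getD i ""]
      else out)
      = fun out i => out ++ pvH ((PySem.Str.split? text ".").getD []) i := by
    funext out i
    simp only [pvH]
    by_cases h1 : pvLastUpper (((PySem.Str.split? text ".").getD []).getD i "") = true
    · rw [if_pos h1, if_pos h1]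
    · rw [if_neg h1, if_neg h1]
      by_cases h2 : (i == 0 || !pvLastUpper (((PySem.Str.split? text ".").getD []).getD (i - 1) "")) = true
      · rw [if_pos h2, if_pos h2]
      · rw [if_neg h2, if_neg h2, List.append_nil]
  rw [h0, hstep, PySem.List.foldl_append_eq_flatMap, List.nil_append]

lemma pv_flatMap_eq_filter_map {α : Type} (l : List Nat) (h : Nat → List α) (g : Nat → α)
    (p : α → Bool) (H : ∀ j ∈ l, h j = if p (g j) then [g j] else []) :
    l.flatMap h = (l.filter (p ∘ g)).map g := by
  induction l with
  | nil => rfl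
  | cons a t ih =>
    simp only [List.flatMap_cons, List.filter_cons]
    rw [H a (by simp), ih (fun j hj => H j (by simp [hj]))]
    by_cases hp : p (g a) <;> simp [hp, Function.comp]

lemma pvH_eq (frags : List String) (hne : ∀ f ∈ frags, f ≠ "") (j : Nat)
    (hj : j < frags.length) :
    pvH frags j = if (fun s => decide (s ≠ "")) (pvG frags j) then [pvG frags j] else [] := by
  have hmem : frags.getD j "" ∈ frags := by
    rw [List.getD_eq_getElem frags "" hj]; exact List.getElem_mem hj
  have hfj : frags.getD j "" ≠ "" := hne _ hmem
  by_cases hU : pvLastUpper (frags.getD j "") = true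
  · simp only [pvH, pvG, if_pos hU]
    rw [if_pos (by simp)]
  · by_cases hc : 0 < j ∧ pvLastUpper (frags.getD (j - 1) "") = true
    · have hb0 : (j == 0) = false := by simpa using Nat.pos_iff_ne_zero.mp hc.1
      simp only [pvH, pvG, if_neg hU, if_pos hc]
      rw [if_neg (fun hh => by rw [hb0, hc.2] at hh; exact Bool.false_ne_true hh),
        if_neg (by simp)]
  -- remaining: fragment kept verbatim by both sides
    · simp only [pvH, pvG, if_neg hU, if_neg hc]
      rw [if_pos ?_, if_pos (by simpa using hfj)]
      rcases Nat.eq_zero_or_pos j with h0 | h0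
      · subst h0; rfl
      · have hfalse : pvLastUpper (frags.getD (j - 1) "") = false := by
          rcases Bool.eq_false_or_eq_true (pvLastUpper (frags.getD (j - 1) "")) with hb | hb
          · exact absurd ⟨h0, hb⟩ hc
          · exact hb
        rw [hfalse]
        simp

-- ===== VERDICT (by name: the statement is the Claim_ definition above) =====
theorem opracuvaty_rechennya_vyklychennya_spec : Claim_equal_opracuvaty_rechennya_vyklychennya := by
  intro text _ hpre
  obtain ⟨hne, -⟩ := hpre
  unfold Spec_opracuvaty_rechennya_vyklychennya
  rw [pvA_eq_filter, pvB_eq_flatMap, List.filter_map,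
    pv_flatMap_eq_filter_map _ _ (pvG ((PySem.Str.split? text ".").getD []))
      (fun s => decide (s ≠ ""))
      (fun j hj => pvH_eq _ hne j (List.mem_range.mp hj))]
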